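-- pv_equiv track=rewrite | github.com/nroumpies/Embedded-NTUA | lab5/exc2/results/local_freq.py | compute_expected
-- ===== SOURCE A (Python) =====
-- from collections import Counter
--
-- MAX_LEN = 64
--
-- def compute_expected(line: str) -> tuple[str, int]:
--     s = line.rstrip("\n")[:MAX_LEN]
--     s = s.replace(" ", "")  # Ignore ASCII space (32)
--
--     if not s:
--         return ("?", 0)
--
--     counts = Counter(s)
--     best_count = max(counts.values())
--
--     # Tie-breaker: smaller ASCII code wins
--     best_char = min(
--         (ch for ch, n in counts.items() if n == best_count),
--         key=lambda ch: ord(ch),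
--     )
--
--     return best_char, best_count
-- ===== SOURCE B (Python) =====
-- MAX_LEN = 64
--
-- def compute_expected(line: str) -> tuple[str, int]:
--     s = line.rstrip("\n")[:MAX_LEN]
--     s = s.replace(" ", "")  # Ignore ASCII space (32)
--
--     if not s:
--         return ("?", 0)
--
--     counts = {}
--     best_char, best_count = "?", 0
--     for ch in s:
--         n = counts.get(ch, 0) + 1
--         counts[ch] = n
--         if n > best_count or (n == best_count and ord(ch) < ord(best_char)):
--             best_char, best_count = ch, n
--     return (best_char, best_count)
-- ===== Notes on version B (the rewrite author's own statement) =====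
-- stated objective: alternative
-- what changed: Replaces Counter plus two aggregation passes (max over values, min-ord over tied items) with a single fused pass that maintains a running count dict and a running (best_char, best_count) pair updated by the count-then-tiebreak rule.
import Mathlib
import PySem

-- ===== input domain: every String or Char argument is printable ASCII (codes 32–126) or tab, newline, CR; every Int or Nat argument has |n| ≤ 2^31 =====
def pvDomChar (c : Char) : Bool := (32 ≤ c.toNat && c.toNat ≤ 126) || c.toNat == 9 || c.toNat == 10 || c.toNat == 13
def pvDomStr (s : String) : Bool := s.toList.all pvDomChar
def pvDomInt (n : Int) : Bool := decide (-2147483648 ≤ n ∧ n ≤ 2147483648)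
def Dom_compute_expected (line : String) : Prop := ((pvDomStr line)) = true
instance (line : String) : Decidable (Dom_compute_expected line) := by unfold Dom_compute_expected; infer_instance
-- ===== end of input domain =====

-- B fuses A's Counter + max + min-ord passes into one running-best pass; return values proved equal, same cost.

-- ===== PORT A =====
-- s.rstrip("\n") ported by hand (PySem has stripChars only for both-sided strip):
-- drop trailing '\n' characters; exact for a one-character strip set.
def pvRstripNl (cs : List Char) : List Char :=
  (cs.reverse.dropWhile (fun c => c == '\n')).reverse

def compute_expected (line : String) : String × Int :=
  let s0 := pvRstripNl line.toList            -- line.rstrip("\n")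
  let s1 := s0.take 64                        -- [:MAX_LEN]
  let s := s1.filter (fun c => c != ' ')      -- .replace(" ", "")
  if s.isEmpty then ("?", 0)
  else
    let counts := PySem.Dict.counter s
    let bestCount := (PySem.List.max? counts.values (fun n => n)).getD 0
    let bestChar :=
      (PySem.List.min? ((counts.items.filter (fun p => p.2 == bestCount)).map Prod.fst)
        (fun c => (c.toNat : Int))).getD '?'
    (String.ofList [bestChar], bestCount)

-- ===== PORT B =====
def pvStep (st : PySem.Dict Char Int × Char × Int) (ch : Char) :
    PySem.Dict Char Int × Char × Int :=
  let n := st.1.getD ch 0 + 1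
  let d := st.1.insert ch n
  if n > st.2.2 || (n == st.2.2 && ch.toNat < st.2.1.toNat) then (d, ch, n) else (d, st.2.1, st.2.2)

def compute_expected_alt (line : String) : String × Int :=
  let s0 := pvRstripNl line.toList
  let s1 := s0.take 64
  let s := s1.filter (fun c => c != ' ')
  if s.isEmpty then ("?", 0)
  else
    let r := s.foldl pvStep (PySem.Dict.empty, '?', 0)
    (String.ofList [r.2.1], r.2.2)

-- ===== PRECONDITION & SPEC =====
def Spec_compute_expected (line : String) (out : String × Int) : Prop := out = compute_expected_alt line
instance (line : String) (out : String × Int) : Decidable (Spec_compute_expected line out) := by unfold Spec_compute_expected; infer_instance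

-- ===== CLAIM (what is proved, stated in full; the proofs are below) =====
def Claim_equal_compute_expected : Prop := ∀ (line : String), Dom_compute_expected line → Spec_compute_expected line (compute_expected line)

-- ===== LEMMAS AND PROOFS =====
-- GoodPair s c n: n is the maximum multiplicity in s, c the smallest-code char attaining it.
def GoodPair (s : List Char) (c : Char) (n : Int) : Prop :=
  c ∈ s ∧ (s.count c : Int) = n ∧ (∀ x ∈ s, (s.count x : Int) ≤ n) ∧
  ∀ x ∈ s, (s.count x : Int) = n → c.toNat ≤ x.toNat

theorem char_toNat_inj {a b : Char} (h : a.toNat = b.toNat) : a = b := by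
  have h1 := Char.ofNat_toNat a
  have h2 := Char.ofNat_toNat b
  rw [← h1, ← h2, h]

theorem goodPair_unique {s : List Char} {c1 c2 : Char} {n1 n2 : Int}
    (h1 : GoodPair s c1 n1) (h2 : GoodPair s c2 n2) : c1 = c2 ∧ n1 = n2 := by
  obtain ⟨m1, e1, b1, t1⟩ := h1
  obtain ⟨m2, e2, b2, t2⟩ := h2
  have hn : n1 = n2 := le_antisymm (e1 ▸ b2 c1 m1) (e2 ▸ b1 c2 m2)
  refine ⟨char_toNat_inj (le_antisymm ?_ ?_), hn⟩
  · exact t1 c2 m2 (by rw [e2, hn])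
  · exact t2 c1 m1 (by rw [e1, ← hn])

-- counts over an appended character
theorem count_append_singleton (s : List Char) (x y : Char) :
    (s ++ [x]).count y = s.count y + (if x = y then 1 else 0) := by
  simp [List.count_append, List.count_singleton, beq_iff_eq]

-- ===== A side =====
theorem A_good (s : List Char) (hs : s ≠ []) :
    ∃ m c,
      PySem.List.max? (PySem.Dict.counter s).values (fun n => n) = some m ∧
      PySem.List.min?
        ((((PySem.Dict.counter s).items).filter (fun p => p.2 == m)).map Prod.fst)
        (fun c => (c.toNat : Int)) = some c ∧
      GoodPair s c m := by
  have hvals : (PySem.Dict.counter s).values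
      = (PySem.Set.ofList s).map (fun k => (s.count k : Int)) := by
    rw [PySem.Dict.values_eq_map_keys _ (PySem.Dict.nodup_keys_counter s) 0,
        PySem.Dict.keys_counter]
    exact List.map_congr_left (fun k _ => PySem.Dict.getD_counter s k)
  have hofne : PySem.Set.ofList s ≠ [] := by
    obtain ⟨y, t, rfl⟩ := List.exists_cons_of_ne_nil hs
    intro h
    have : y ∈ PySem.Set.ofList (y :: t) := (PySem.Set.mem_ofList _ _).2 (by simp)
    simp [h] at this
  have hvne : (PySem.Dict.counter s).values ≠ [] := by
    rw [hvals]; simpa using hofne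
  obtain ⟨m, hm⟩ : ∃ m, PySem.List.max? (PySem.Dict.counter s).values (fun n => n) = some m := by
    cases h : PySem.List.max? (PySem.Dict.counter s).values (fun n => n) with
    | none => exact absurd ((PySem.List.max?_eq_none_iff _ _).1 h) hvne
    | some m => exact ⟨m, rfl⟩
  -- m bounds every count and is attained
  have hmax : ∀ x ∈ s, (s.count x : Int) ≤ m := by
    intro x hx
    exact PySem.List.max?_isMax hm _ (by
      rw [hvals]; exact List.mem_map_of_mem ((PySem.Set.mem_ofList s x).2 hx))
  obtain ⟨k0, hk0mem, hk0⟩ : ∃ k0, k0 ∈ s ∧ (s.count k0 : Int) = m := by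
    have := PySem.List.max?_mem hm
    rw [hvals] at this
    obtain ⟨k0, hk0, he⟩ := List.mem_map.1 this
    exact ⟨k0, (PySem.Set.mem_ofList s k0).1 hk0, he⟩
  -- the candidate list
  have hL : (((PySem.Dict.counter s).items).filter (fun p => p.2 == m)).map Prod.fst
      = (PySem.Set.ofList s).filter (fun k => (s.count k : Int) == m) := by
    rw [PySem.Dict.items_counter, List.filter_map, List.map_map]
    simp [Function.comp_def]
  have hmemL : ∀ y, y ∈ (((PySem.Dict.counter s).items).filter (fun p => p.2 == m)).map Prod.fst
      ↔ (y ∈ s ∧ (s.count y : Int) = m) := by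
    intro y
    rw [hL, List.mem_filter, PySem.Set.mem_ofList]
    simp
  have hLne : (((PySem.Dict.counter s).items).filter (fun p => p.2 == m)).map Prod.fst ≠ [] := by
    intro h
    have := (hmemL k0).2 ⟨hk0mem, hk0⟩
    simp [h] at this
  obtain ⟨c, hc⟩ : ∃ c, PySem.List.min?
      ((((PySem.Dict.counter s).items).filter (fun p => p.2 == m)).map Prod.fst)
      (fun c => (c.toNat : Int)) = some c := by
    cases h : PySem.List.min?
        ((((PySem.Dict.counter s).items).filter (fun p => p.2 == m)).map Prod.fst)
        (fun c => (c.toNat : Int)) with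
    | none => exact absurd ((PySem.List.min?_eq_none_iff _ _).1 h) hLne
    | some c => exact ⟨c, rfl⟩
  have hcmem := (hmemL c).1 (PySem.List.min?_mem hc)
  refine ⟨m, c, hm, hc, hcmem.1, hcmem.2, hmax, ?_⟩
  intro x hx hxc
  have := PySem.List.min?_isMin hc x ((hmemL x).2 ⟨hx, hxc⟩)
  exact_mod_cast this

-- ===== B side: fold invariant =====
theorem fold_inv (s : List Char) (hs : s ≠ []) :
    (∀ c : Char, (s.foldl pvStep (PySem.Dict.empty, '?', 0)).1.getD c 0 = (s.count c : Int)) ∧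
    GoodPair s (s.foldl pvStep (PySem.Dict.empty, '?', 0)).2.1
      (s.foldl pvStep (PySem.Dict.empty, '?', 0)).2.2 := by
  induction s using List.reverseRecOn with
  | nil => exact absurd rfl hs
  | append_singleton s x ih =>
    rcases eq_or_ne s [] with rfl | hs'
    · constructor
      · intro c
        rcases eq_or_ne c x with rfl | hne
        · simp [pvStep, PySem.Dict.getD_insert_self]
        · simp [pvStep, PySem.Dict.getD_insert_of_ne _ _ _ hne, Ne.symm hne]
      · simp [pvStep, GoodPair, List.count_singleton]
    · obtain ⟨hd, hg⟩ := ih hs'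
      rw [List.foldl_append]
      simp only [List.foldl_cons, List.foldl_nil]
      set st := s.foldl pvStep (PySem.Dict.empty, '?', 0) with hst
      obtain ⟨mem, ecnt, bnd, tie⟩ := hg
      have hxcnt : ((s ++ [x]).count x : Int) = (s.count x : Int) + 1 := by
        rw [count_append_singleton]; simp
      have hcnt_ne : ∀ y : Char, y ≠ x → ((s ++ [x]).count y : Int) = (s.count y : Int) := by
        intro y hy; rw [count_append_singleton]; simp [Ne.symm hy]
      have hmem' : ∀ y : Char, y ∈ s ++ [x] → y ≠ x → y ∈ s := by
        intro y hy hne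
        rcases List.mem_append.1 hy with h | h
        · exact h
        · simp at h; exact absurd h hne
      have hdict : (pvStep st x).1 = st.1.insert x (st.1.getD x 0 + 1) := by
        simp only [pvStep]; split <;> rfl
      constructor
      · intro c
        rw [hdict]
        rcases eq_or_ne c x with rfl | hne
        · rw [PySem.Dict.getD_insert_self, hd c, hxcnt]
        · rw [PySem.Dict.getD_insert_of_ne _ _ _ hne, hd c, hcnt_ne c hne]
      · by_cases hcond : (decide (st.1.getD x 0 + 1 > st.2.2)
            || ((st.1.getD x 0 + 1 == st.2.2) && decide (x.toNat < st.2.1.toNat))) = true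
        · have hstep : pvStep st x = (st.1.insert x (st.1.getD x 0 + 1), x, st.1.getD x 0 + 1) := by
            simp only [pvStep]; rw [if_pos hcond]
          rw [hstep]
          simp only [Bool.or_eq_true, decide_eq_true_eq, Bool.and_eq_true, beq_iff_eq] at hcond
          rw [hd x] at hcond
          refine ⟨by simp, ?_, ?_, ?_⟩
          · dsimp only; rw [hd x, hxcnt]
          · intro y hy
            dsimp only
            rw [hd x]
            rcases eq_or_ne y x with rfl | hne
            · rw [hxcnt]
            · rw [hcnt_ne y hne]
              have := bnd y (hmem' y hy hne)
              rcases hcond with h | ⟨h, _⟩ <;> omega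
          · intro y hy hyc
            dsimp only at hyc ⊢
            rcases eq_or_ne y x with rfl | hne
            · exact le_refl _
            · rw [hcnt_ne y hne, hd x] at hyc
              have hle := bnd y (hmem' y hy hne)
              rcases hcond with h | ⟨h, h2⟩
              · omega
              · have := tie y (hmem' y hy hne) (by omega)
                omega
        · have hstep : pvStep st x = (st.1.insert x (st.1.getD x 0 + 1), st.2.1, st.2.2) := by
            simp only [pvStep]; rw [if_neg hcond]
          rw [hstep]
          simp only [Bool.or_eq_true, decide_eq_true_eq, Bool.and_eq_true, beq_iff_eq,
            not_or, not_and, not_lt] at hcond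
          rw [hd x] at hcond
          obtain ⟨hng, himp⟩ := hcond
          have hbcx : st.2.1 ≠ x := by
            intro h
            have : (s.count x : Int) = st.2.2 := by rw [← h]; exact ecnt
            omega
          refine ⟨List.mem_append.2 (Or.inl mem), ?_, ?_, ?_⟩
          · dsimp only; rw [hcnt_ne _ hbcx]; exact ecnt
          · intro y hy
            dsimp only
            rcases eq_or_ne y x with rfl | hne
            · rw [hxcnt]
              omega
            · rw [hcnt_ne y hne]
              exact bnd y (hmem' y hy hne)
          · intro y hy hyc
            dsimp only at hyc ⊢
            rcases eq_or_ne y x with rfl | hne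
            · rw [hxcnt] at hyc
              exact himp (by omega)
            · rw [hcnt_ne y hne] at hyc
              exact tie y (hmem' y hy hne) hyc

theorem main_equiv (line : String) : compute_expected line = compute_expected_alt line := by
  unfold compute_expected compute_expected_alt
  by_cases hse : (((pvRstripNl line.toList).take 64).filter (fun c => c != ' ')).isEmpty = true
  · rw [if_pos hse, if_pos hse]
  · rw [if_neg hse, if_neg hse]
    dsimp only
    have hs : ((pvRstripNl line.toList).take 64).filter (fun c => c != ' ') ≠ [] := by
      simpa [List.isEmpty_iff] using hse
    obtain ⟨m, c, hm, hc, hgA⟩ := A_good _ hs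
    obtain ⟨_, hgB⟩ := fold_inv _ hs
    obtain ⟨hceq, hneq⟩ := goodPair_unique hgA hgB
    rw [hm]
    simp only [Option.getD_some]
    rw [hc]
    simp only [Option.getD_some]
    rw [hceq, hneq]

-- ===== VERDICT (by name: the statement is the Claim_ definition above) =====
theorem compute_expected_spec : Claim_equal_compute_expected := by
  intro line _
  unfold Spec_compute_expected
  exact main_equiv line
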